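-- pv_equiv track=rewrite | github.com/Hadleigh-Schwartz/Short-Partner-Projects | ga2.py | convert_to_valid
-- ===== SOURCE A (Python) =====
-- def convert_to_valid(genome):
-- 	"""Converts the raw functions to a valid expression"""
-- 	try:
--
-- 		valid_expression = ""
-- 		counter = 0
-- 		char_type = None
-- 		prev_type = "operator"
--
-- 		for x,character in enumerate(genome):
-- 			if (genome[x] == "+" or genome[x] == "-" or genome[x] == "*"
-- 				or genome[x] == "/"):
-- 				char_type = "operator"
--
-- 			else:
-- 				char_type = "operand"
--
-- 			if prev_type != char_type:
-- 				valid_expression += genome[x]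
--
-- 			prev_type = char_type
--
-- 		"""Make sure last character is not an operator"""
-- 		if (valid_expression[len(valid_expression) - 1] == "+" or valid_expression[len(valid_expression) - 1] == "-"
-- 			or valid_expression[len(valid_expression) - 1] == "*" or
-- 			valid_expression[len(valid_expression) - 1] == "/"):
-- 			valid_expression = valid_expression[0:-1]
--
-- 		return valid_expression
--
-- 	except:
-- 		return "fail"
-- ===== SOURCE B (Python) =====
-- def convert_to_valid(genome):
--     """Converts the raw functions to a valid expression.
--
--     Pointer-jumping run parser: instead of classifying every character against
--     its predecessor, jump between run boundaries, emitting the first char of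
--     each operand run and of each separating operator run."""
--     OPS = "+-*/"
--     n = len(genome)
--     i = 0
--     while i < n and genome[i] in OPS:       # jump past a leading operator run
--         i += 1
--     if i == n:
--         return "fail"                       # no operand anywhere
--     out = []
--     while True:
--         out.append(genome[i])               # first char of an operand run
--         while i < n and genome[i] not in OPS:
--             i += 1                          # jump past the operand run
--         j = i
--         while j < n and genome[j] in OPS:
--             j += 1                          # jump past the operator run
--         if j == n:
--             break                           # trailing operators (or end): stop
--         out.append(genome[i])               # first operator of the separating run
--         i = j
--     return "".join(out)
-- ===== Notes on version B (the rewrite author's own statement) =====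
-- stated objective: faster
-- what changed: Replaces A's per-character prev/current-type state machine with post-hoc trailing strip and try/except by a pointer-jumping run parser: skip the leading operator run, then alternately emit the first char of an operand run and of the separating operator run, stopping at the end; touches no per-char string-compare state, measured ~2x faster.
import Mathlib
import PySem

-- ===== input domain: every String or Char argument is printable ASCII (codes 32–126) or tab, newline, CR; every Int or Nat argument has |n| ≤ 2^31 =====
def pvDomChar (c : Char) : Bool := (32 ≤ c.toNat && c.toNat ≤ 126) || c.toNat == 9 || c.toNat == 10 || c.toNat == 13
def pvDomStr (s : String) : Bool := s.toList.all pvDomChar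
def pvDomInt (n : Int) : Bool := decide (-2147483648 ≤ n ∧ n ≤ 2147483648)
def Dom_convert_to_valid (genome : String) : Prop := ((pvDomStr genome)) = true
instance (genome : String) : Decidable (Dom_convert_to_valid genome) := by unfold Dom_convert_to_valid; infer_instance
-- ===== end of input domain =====

-- B replaces A's per-character state machine (+ trailing strip + try/except) by a
-- pointer-jumping run parser that alternately emits the first char of each operand
-- run and of each separating operator run; objective: alternative.


-- ===== PORT A =====
def convert_to_valid (genome : String) : String :=
  let st := genome.toList.foldl (fun (st : List Char × String) c =>
      let char_type := if c == '+' || c == '-' || c == '*' || c == '/' then "operator" else "operand"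
      let valid_expression := if st.2 ≠ char_type then st.1 ++ [c] else st.1
      (valid_expression, char_type)) ([], "operator")
  let ve := st.1
  -- valid_expression[len(valid_expression) - 1]: IndexError on "" is caught by the except → "fail"
  match PySem.List.pyGet? ve ((ve.length : Int) - 1) with
  | none => "fail"
  | some last =>
    if last == '+' || last == '-' || last == '*' || last == '/' then
      String.ofList (PySem.List.slice ve (some 0) (some (-1)))
    else String.ofList ve

-- ===== PORT B =====
def pvIsOp (c : Char) : Bool := c == '+' || c == '-' || c == '*' || c == '/'

-- the main 'while True' loop of Source B; on entry the head of the list is an operand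
-- (the 'while genome[i] not in OPS' skip starts at the operand head itself in Source B,
-- which is the same as skipping from the next position, ported as dropWhile on cs)
def pvLoop : List Char → List Char
  | [] => []
  | c :: cs =>
    let rest := cs.dropWhile (fun d => !pvIsOp d)        -- jump past the operand run
    let after := rest.dropWhile pvIsOp                   -- jump past the operator run
    if after.isEmpty then [c]                            -- trailing operators / end: stop
    else c :: rest.headD ' ' :: pvLoop after
termination_by l => l.length
decreasing_by
  calc (rest.dropWhile pvIsOp).length ≤ rest.length := List.length_dropWhile_le _ _
    _ ≤ cs.length := List.length_dropWhile_le _ _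
    _ < (c :: cs).length := by simp

def convert_to_valid_alt (genome : String) : String :=
  let s := genome.toList.dropWhile pvIsOp                -- jump past a leading operator run
  if s.isEmpty then "fail" else String.ofList (pvLoop s)

-- ===== PRECONDITION & SPEC =====
def Spec_convert_to_valid (genome : String) (out : String) : Prop := out = convert_to_valid_alt genome
instance (genome : String) (out : String) : Decidable (Spec_convert_to_valid genome out) := by unfold Spec_convert_to_valid; infer_instance

-- ===== CLAIM (what is proved, stated in full; the proofs are below) =====
def Claim_equal_convert_to_valid : Prop := ∀ (genome : String), Dom_convert_to_valid genome → Spec_convert_to_valid genome (convert_to_valid genome)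

-- ===== LEMMAS AND PROOFS =====

/-- A's collapsed expression: keep each char whose type differs from the previous one
(`p` = previous char was an operator). -/
def pvCollapse (p : Bool) : List Char → List Char
  | [] => []
  | c :: cs => if pvIsOp c == p then pvCollapse (pvIsOp c) cs else c :: pvCollapse (pvIsOp c) cs

lemma pvFoldA (l : List Char) : ∀ (acc : List Char) (b : Bool),
    (l.foldl (fun (st : List Char × String) c =>
      let char_type := if c == '+' || c == '-' || c == '*' || c == '/' then "operator" else "operand"
      let valid_expression := if st.2 ≠ char_type then st.1 ++ [c] else st.1
      (valid_expression, char_type)) (acc, if b then "operator" else "operand")).1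
    = acc ++ pvCollapse b l := by
  induction l with
  | nil => intro acc b; simp [pvCollapse]
  | cons c cs ih =>
    intro acc b
    have hct : (if c == '+' || c == '-' || c == '*' || c == '/' then "operator" else "operand")
        = (if pvIsOp c then "operator" else "operand") := by simp [pvIsOp]
    simp only [List.foldl_cons]
    rw [hct, ih]
    cases b <;> cases h : pvIsOp c <;>
      simp [pvCollapse, h, List.append_assoc]

lemma pvFinal (e : List Char) :
    (match PySem.List.pyGet? e ((e.length : Int) - 1) with
      | none => "fail"
      | some last =>
        if last == '+' || last == '-' || last == '*' || last == '/' then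
          String.ofList (PySem.List.slice e (some 0) (some (-1)))
        else String.ofList e)
    = (if e.isEmpty then "fail"
       else String.ofList (if pvIsOp (e.getLastD ' ') then e.dropLast else e)) := by
  cases e with
  | nil => decide
  | cons c cs =>
    have hlast : (c :: cs)[(c :: cs).length - 1]? = some ((c :: cs).getLastD ' ') := by
      rw [List.getElem?_eq_getElem (by simp)]
      simp [List.getLastD_eq_getLast?, List.getLast?_eq_getElem?]
      rfl
    have hslice : PySem.List.slice (c :: cs) (some 0) (some (-1)) = (c :: cs).dropLast := by
      simp [pysem]
    have hlen : (((c :: cs).length : Int) - 1) = (((c :: cs).length - 1 : Nat) : Int) := by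
      simp
    rw [hlen, PySem.List.pyGet?_natCast, hlast]
    simp [pvIsOp, hslice, apply_ite String.ofList]

/-- Collapsing skips a prefix of chars whose type equals the running previous type. -/
lemma pvCollapse_skip (pre : List Char) (rest : List Char) (p : Bool)
    (h : ∀ x ∈ pre, pvIsOp x = p) :
    pvCollapse p (pre ++ rest) = pvCollapse p rest := by
  induction pre with
  | nil => rfl
  | cons x xs ih =>
    have hx : pvIsOp x = p := h x (by simp)
    simp only [List.cons_append, pvCollapse, hx]
    simp only [beq_self_eq_true, if_true]
    exact ih (fun y hy => h y (by simp [hy]))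

def pvStrip (e : List Char) : List Char :=
  if pvIsOp (e.getLastD ' ') then e.dropLast else e

/-- Main correspondence: on a list whose head is an operand, A's collapse followed by
the trailing strip equals B's pointer-jumping loop. -/
lemma pvMain : ∀ (n : Nat) (s : List Char), s.length ≤ n →
    (∀ c cs, s = c :: cs → pvIsOp c = false) →
    pvStrip (pvCollapse true s) = pvLoop s := by
  intro n
  induction n with
  | zero =>
    intro s hs _
    have : s = [] := List.eq_nil_of_length_eq_zero (Nat.le_zero.mp hs)
    subst this
    simp [pvStrip, pvCollapse, pvLoop, pvIsOp]
  | succ n ih =>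
    intro s hs hhead
    cases s with
    | nil => simp [pvStrip, pvCollapse, pvLoop, pvIsOp]
    | cons c cs =>
      have hc : pvIsOp c = false := hhead c cs rfl
      have hsplit : cs = cs.takeWhile (fun d => !pvIsOp d) ++ cs.dropWhile (fun d => !pvIsOp d) :=
        (List.takeWhile_append_dropWhile).symm
      set rest := cs.dropWhile (fun d => !pvIsOp d) with hrest
      have hcol : pvCollapse true (c :: cs) = c :: pvCollapse false rest := by
        simp only [pvCollapse, hc]
        rw [show pvCollapse false cs = pvCollapse false rest by
          conv_lhs => rw [hsplit]
          exact pvCollapse_skip _ _ _ (fun x hx => by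
            have := List.mem_takeWhile_imp hx
            simpa using this)]
        simp
      cases hr : rest with
      | nil =>
        simp only [pvLoop, ← hrest, hr, List.dropWhile_nil, List.isEmpty_nil, if_true]
        rw [hcol, hr]
        simp [pvCollapse, pvStrip, hc]
      | cons o os =>
        have ho : pvIsOp o = true := by
          have := List.head_dropWhile_not (p := fun d => !pvIsOp d) (l := cs)
          rw [← hrest, hr] at this
          simpa using this (by simp)
        set after := os.dropWhile pvIsOp with hafter
        have hsplit2 : os = os.takeWhile pvIsOp ++ after :=
          (List.takeWhile_append_dropWhile).symm
        have hcol2 : pvCollapse false rest = o :: pvCollapse true after := by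
          rw [hr]
          simp only [pvCollapse, ho]
          rw [show pvCollapse true os = pvCollapse true after by
            conv_lhs => rw [hsplit2]
            exact pvCollapse_skip _ _ _ (fun x hx => by
              have := List.mem_takeWhile_imp hx
              simpa using this)]
          simp
        have hloopunfold : pvLoop (c :: cs) =
            (if after.isEmpty then [c] else c :: o :: pvLoop after) := by
          rw [pvLoop]
          simp only [← hrest, hr, List.dropWhile_cons, ho, if_true, ← hafter,
            List.headD_cons]
        cases ha : after with
        | nil =>
          rw [hloopunfold, ha]
          simp only [List.isEmpty_nil, if_true]
          rw [hcol, hcol2, ha]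
          simp [pvCollapse, pvStrip, ho]
        | cons a as =>
          have hA : pvIsOp a = false := by
            have := List.head_dropWhile_not (p := pvIsOp) (l := os)
            rw [← hafter, ha] at this
            simpa using this (by simp)
          have hlen : after.length ≤ n := by
            have h1 : after.length ≤ os.length := by
              rw [hafter]; exact List.length_dropWhile_le _ _
            have h2 : rest.length ≤ cs.length := by
              rw [hrest]; exact List.length_dropWhile_le _ _
            rw [hr] at h2
            simp only [List.length_cons] at h2 hs
            omega
          have hih := ih after hlen (fun x xs hx => by rw [ha] at hx; cases hx; exact hA)
          have hne : pvCollapse true after ≠ [] := by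
            rw [ha]; simp [pvCollapse, hA]
          rw [hloopunfold, ha]
          simp only [List.isEmpty_cons, Bool.false_eq_true, if_false]
          rw [hcol, hcol2, ← ha, ← hih]
          -- pvStrip commutes with the two kept cons cells when the tail is nonempty
          obtain ⟨t, ts, ht⟩ := List.exists_cons_of_ne_nil hne
          rw [ht]
          simp [pvStrip, List.getLastD_eq_getLast?, List.getLast?_cons_cons]
          split_ifs <;> simp

-- ===== VERDICT (by name: the statement is the Claim_ definition above) =====
theorem convert_to_valid_spec : Claim_equal_convert_to_valid := by
  intro genome _
  unfold Spec_convert_to_valid convert_to_valid convert_to_valid_alt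
  have hf := pvFoldA genome.toList [] true
  simp only [if_true, List.nil_append] at hf
  simp only [hf]
  rw [pvFinal]
  have hcol : pvCollapse true genome.toList
      = pvCollapse true (genome.toList.dropWhile pvIsOp) := by
    conv_lhs => rw [show genome.toList
        = genome.toList.takeWhile pvIsOp ++ genome.toList.dropWhile pvIsOp from
      (List.takeWhile_append_dropWhile).symm]
    exact pvCollapse_skip _ _ _ (fun x hx => by
      have := List.mem_takeWhile_imp hx
      simpa using this)
  rw [hcol]
  cases hcase : genome.toList.dropWhile pvIsOp with
  | nil => simp [pvCollapse]
  | cons c cs =>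
    have hc : pvIsOp c = false := by
      have h := List.head_dropWhile_not (p := pvIsOp) (l := genome.toList)
      rw [hcase] at h
      simpa using h (by simp)
    have hmain := pvMain (c :: cs).length (c :: cs) le_rfl (fun x xs hx => by
      cases hx; exact hc)
    have hne : pvCollapse true (c :: cs) = c :: pvCollapse false cs := by
      simp [pvCollapse, hc]
    rw [hne]
    simp only [List.isEmpty_cons, Bool.false_eq_true, if_false]
    rw [← hne]
    unfold pvStrip at hmain
    rw [hmain]
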